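-- pv_equiv track=rewrite | github.com/wherby/code | contest/00000c443d154/c486/q1/t1.py | minimumPrefixLength
-- ===== SOURCE A (Python) =====
-- from typing import List, Tuple, Optional
--
-- def minimumPrefixLength(nums: List[int]) -> int:
--     n = len(nums)
--     cnt = n-1
--     for i in range(n-2,-1,-1):
--         if nums[i] >= nums[i+1]:
--             return cnt
--         else:
--             cnt-=1
--     return cnt
-- ===== SOURCE B (Python) =====
-- def minimumPrefixLength(nums):
--     if not nums:
--         return 0
--     run = 1
--     prev = nums[0]
--     for x in nums[1:]:
--         run = run + 1 if prev < x else 1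
--         prev = x
--     return len(nums) - run
-- ===== Notes on version B (the rewrite author's own statement) =====
-- stated objective: alternative
-- what changed: Backward early-exit index scan with a decrementing counter replaced by a forward run-length pass over the elements themselves: it maintains the length of the current strictly increasing run and returns n minus the final run (the length of the increasing suffix), no index arithmetic or early exit.
-- intended difference: On the empty list A returns -1 (leftover sentinel from cnt = n-1) while B returns 0, the intended answer since the empty prefix already leaves an increasing suffix. — e.g. on minimumPrefixLength([]): A returns -1, B returns 0
import Mathlib
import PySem

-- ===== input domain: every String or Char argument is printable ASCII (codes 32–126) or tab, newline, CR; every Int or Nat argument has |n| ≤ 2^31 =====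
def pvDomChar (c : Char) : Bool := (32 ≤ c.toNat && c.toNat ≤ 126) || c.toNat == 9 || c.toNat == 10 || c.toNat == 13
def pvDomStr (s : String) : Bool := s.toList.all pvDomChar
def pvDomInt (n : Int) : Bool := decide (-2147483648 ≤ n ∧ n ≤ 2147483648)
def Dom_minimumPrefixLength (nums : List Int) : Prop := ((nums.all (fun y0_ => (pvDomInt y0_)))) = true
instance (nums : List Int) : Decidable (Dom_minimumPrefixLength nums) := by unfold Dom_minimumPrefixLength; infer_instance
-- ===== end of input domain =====

-- ===== PORT A =====
-- B replaces A's backward early-exit index scan by a forward run-length pass over the elements.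
-- A's loop 'for i in range(n-2,-1,-1): if nums[i] >= nums[i+1]: return cnt; else cnt -= 1'
def goA (nums : List Int) : List Int → Int → Int
  | [], cnt => cnt
  | i :: rest, cnt =>
    match PySem.List.pyGet? nums i, PySem.List.pyGet? nums (i + 1) with
    | some a, some b => if a ≥ b then cnt else goA nums rest (cnt - 1)
    | _, _ => goA nums rest (cnt - 1)   -- indices produced by the range are always in bounds

def minimumPrefixLength (nums : List Int) : Int :=
  let n : Int := nums.length
  goA nums (PySem.List.pyRange (n - 2) (-1) (-1)) (n - 1)

-- ===== PORT B =====
-- B's loop 'for x in nums[1:]: run = run + 1 if prev < x else 1; prev = x'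
def runB : Int → Int → List Int → Int
  | _, run, [] => run
  | prev, run, x :: rest => runB x (if prev < x then run + 1 else 1) rest

def minimumPrefixLength_alt (nums : List Int) : Int :=
  match nums with
  | [] => 0
  | x :: rest => (nums.length : Int) - runB x 1 rest

-- ===== PRECONDITION & SPEC =====
-- On the empty list A returns -1 (a leftover sentinel from cnt = n-1) while B returns 0, the
-- intended answer since the empty prefix already leaves an increasing suffix.
def D_minimumPrefixLength (nums : List Int) : Prop := nums = []
instance (nums : List Int) : Decidable (D_minimumPrefixLength nums) := by
  unfold D_minimumPrefixLength; infer_instance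
def Spec_minimumPrefixLength (nums : List Int) (out : Int) : Prop :=
  ¬ D_minimumPrefixLength nums → out = minimumPrefixLength_alt nums
instance (nums : List Int) (out : Int) : Decidable (Spec_minimumPrefixLength nums out) := by
  unfold Spec_minimumPrefixLength; infer_instance
def pvDiffWitness_minimumPrefixLength : List Int := []
def pvDiffWitnessOut_minimumPrefixLength : Int × Int := (-1, 0)

-- ===== CLAIM (what is proved, stated in full; the proofs are below) =====
def Claim_unchanged_minimumPrefixLength : Prop := ∀ (nums : List Int), Dom_minimumPrefixLength nums → Spec_minimumPrefixLength nums (minimumPrefixLength nums)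
def Claim_changed_minimumPrefixLength : Prop := Dom_minimumPrefixLength (pvDiffWitness_minimumPrefixLength) ∧ D_minimumPrefixLength (pvDiffWitness_minimumPrefixLength) ∧ minimumPrefixLength (pvDiffWitness_minimumPrefixLength) = pvDiffWitnessOut_minimumPrefixLength.1 ∧ minimumPrefixLength_alt (pvDiffWitness_minimumPrefixLength) = pvDiffWitnessOut_minimumPrefixLength.2 ∧ pvDiffWitnessOut_minimumPrefixLength.1 ≠ pvDiffWitnessOut_minimumPrefixLength.2
def Claim_exact_minimumPrefixLength : Prop := ∀ (nums : List Int), Dom_minimumPrefixLength nums → D_minimumPrefixLength nums → minimumPrefixLength nums ≠ minimumPrefixLength_alt nums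

-- ===== LEMMAS AND PROOFS =====

-- length of the maximal strictly increasing suffix of a list (reference function for the proof)
def srun : List Int → Int
  | [] => 0
  | [_] => 1
  | a :: b :: rest =>
    if a < b ∧ srun (b :: rest) = rest.length + 1 then rest.length + 2 else srun (b :: rest)

theorem srun_bounds : ∀ (l : List Int), l ≠ [] → 1 ≤ srun l ∧ srun l ≤ l.length := by
  intro l
  induction l with
  | nil => intro h; exact absurd rfl h
  | cons a rest ih =>
    intro _
    cases rest with
    | nil => simp [srun]
    | cons b r =>
      have hb := ih (by simp)
      by_cases h : a < b ∧ srun (b :: r) = r.length + 1 <;>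
        simp [srun, h] at hb ⊢ <;> omega

-- unfolding equation for srun on a list with two exposed heads
theorem srun_cons2 (x b : Int) (r : List Int) :
    srun (x :: b :: r) =
      if x < b ∧ srun (b :: r) = r.length + 1 then (r.length : Int) + 2 else srun (b :: r) := rfl

-- appending one element to a nonempty list: the run extends by one or restarts at 1
theorem srun_snoc : ∀ (l : List Int) (a c : Int),
    srun (l ++ [a] ++ [c]) = if a < c then srun (l ++ [a]) + 1 else 1 := by
  intro l
  induction l with
  | nil =>
    intro a c
    by_cases h : a < c <;> simp [srun, h]
  | cons x l' ih =>
    intro a c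
    cases l' with
    | nil =>
      by_cases h1 : a < c <;> by_cases h2 : x < a <;> simp [srun, h1, h2]
    | cons y l'' =>
      have hb := srun_bounds (y :: (l'' ++ [a])) (by simp)
      have ihk := ih a c
      simp only [List.cons_append, List.length_cons, List.length_append] at ihk hb ⊢
      rw [srun_cons2, srun_cons2, ihk]
      by_cases h1 : a < c
      · rw [if_pos h1]
        split_ifs <;> simp [List.length_append] at * <;> omega
      · rw [if_neg h1]
        split_ifs <;> simp [List.length_append] at * <;> omega

theorem runB_char : ∀ (l : List Int) (prev run : Int),
    runB prev run l =
      if srun (prev :: l) = l.length + 1 then run + l.length else srun (prev :: l) := by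
  intro l
  induction l with
  | nil => intro prev run; simp [runB, srun]
  | cons x rest ih =>
    intro prev run
    have hb := srun_bounds (x :: rest) (by simp)
    simp only [runB, ih x]
    by_cases hlt : prev < x <;>
      by_cases hfull : srun (x :: rest) = rest.length + 1 <;>
        · simp only [srun, List.length_cons]
          simp [hlt, hfull] at hb ⊢ <;> omega

theorem alt_eq_sub_srun (x : Int) (rest : List Int) :
    minimumPrefixLength_alt (x :: rest) = ((x :: rest).length : Int) - srun (x :: rest) := by
  have h := runB_char rest x 1
  simp only [minimumPrefixLength_alt, h]
  by_cases hfull : srun (x :: rest) = rest.length + 1 <;> simp [hfull] <;> omega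

theorem goA_step (nums : List Int) (i : Int) (rest : List Int) (cnt a b : Int)
    (h1 : PySem.List.pyGet? nums i = some a) (h2 : PySem.List.pyGet? nums (i + 1) = some b) :
    goA nums (i :: rest) cnt = if a ≥ b then cnt else goA nums rest (cnt - 1) := by
  simp [goA, h1, h2]

-- the backward scan over [k-1, …, 0] with cnt = k computes (k+1) - srun (take (k+1))
theorem goA_char (nums : List Int) :
    ∀ (k : ℕ), k < nums.length →
      goA nums (PySem.List.pyRange 0 (k : Int) 1).reverse (k : Int) =
        ((k : Int) + 1) - srun (nums.take (k + 1)) := by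
  intro k
  induction k with
  | zero =>
    intro hk
    rcases nums with _ | ⟨x, rest⟩
    · simp at hk
    · simp [PySem.List.pyRange_one_eq_nil, goA, srun, List.take]
  | succ k ih =>
    intro hk
    have hk' : k < nums.length := Nat.lt_of_succ_lt hk
    have hcast : ((k + 1 : ℕ) : Int) = (k : Int) + 1 := by omega
    have hsplit : PySem.List.pyRange 0 ((k : Int) + 1) 1
        = PySem.List.pyRange 0 (k : Int) 1 ++ [(k : Int)] :=
      PySem.List.pyRange_one_succ_right (by positivity)
    have hget1 : PySem.List.pyGet? nums (k : Int) = some nums[k] := by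
      rw [PySem.List.pyGet?_natCast, List.getElem?_eq_getElem hk']
    have hget2 : PySem.List.pyGet? nums ((k : Int) + 1) = some nums[k + 1] := by
      rw [← hcast, PySem.List.pyGet?_natCast, List.getElem?_eq_getElem hk]
    have htake1 : nums.take (k + 1) = nums.take k ++ [nums[k]] := by
      rw [List.take_add_one, List.getElem?_eq_getElem hk']; rfl
    have htake2 : nums.take (k + 2) = nums.take (k + 1) ++ [nums[k + 1]] := by
      rw [show k + 2 = (k + 1) + 1 from rfl, List.take_add_one, List.getElem?_eq_getElem hk]; rfl
    have hst : srun (nums.take (k + 2)) =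
        if nums[k] < nums[k + 1] then srun (nums.take (k + 1)) + 1 else 1 := by
      rw [htake2, htake1, srun_snoc, ← htake1]
    rw [hcast, hsplit, List.reverse_append, List.reverse_singleton, List.singleton_append,
      goA_step nums (k : Int) _ _ _ _ hget1 hget2]
    by_cases hd : nums[k] ≥ nums[k + 1]
    · rw [if_pos hd, hst, if_neg (by omega)]
      ring
    · rw [if_neg hd, hst, if_pos (by omega)]
      have h1 : ((k : Int) + 1 - 1) = (k : Int) := by ring
      rw [h1, ih hk']
      omega

theorem minimumPrefixLength_eq_alt (nums : List Int) (h : nums ≠ []) :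
    minimumPrefixLength nums = minimumPrefixLength_alt nums := by
  rcases nums with _ | ⟨x, rest⟩
  · exact absurd rfl h
  have hlen : 1 ≤ (x :: rest).length := by simp
  have hm : ((x :: rest).length : Int) - 1 = (((x :: rest).length - 1 : ℕ) : Int) := by
    push_cast [hlen]; ring
  have hrev : PySem.List.pyRange (((x :: rest).length : Int) - 2) (-1) (-1)
      = (PySem.List.pyRange 0 (((x :: rest).length : Int) - 1) 1).reverse := by
    have h2 : (((x :: rest).length : Int) - 2) + 1 = ((x :: rest).length : Int) - 1 := by ring
    have := PySem.List.pyRange_neg_one_eq_reverse (((x :: rest).length : Int) - 2) (-1)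
    rw [h2] at this
    simpa using this
  show goA (x :: rest) (PySem.List.pyRange (((x :: rest).length : Int) - 2) (-1) (-1))
      (((x :: rest).length : Int) - 1) = minimumPrefixLength_alt (x :: rest)
  rw [hrev, hm, goA_char (x :: rest) ((x :: rest).length - 1) (by omega),
    alt_eq_sub_srun]
  have ht : (x :: rest).length - 1 + 1 = (x :: rest).length := by omega
  rw [ht, List.take_length]
  push_cast [hlen]
  ring_nf

-- ===== VERDICT (by name: the statement is the Claim_ definition above) =====
theorem minimumPrefixLength_spec : Claim_unchanged_minimumPrefixLength := by
  intro nums _ hD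
  exact minimumPrefixLength_eq_alt nums hD

theorem minimumPrefixLength_changed : Claim_changed_minimumPrefixLength := by
  unfold Claim_changed_minimumPrefixLength; decide

theorem minimumPrefixLength_tight : Claim_exact_minimumPrefixLength := by
  intro nums _ hD
  subst hD
  decide
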